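-- pv_equiv track=rewrite | github.com/Dusadee-30/DATASTRUC | lab 2/63010356_lab2_2.py | weirdSubtract
-- ===== SOURCE A (Python) =====
-- def weirdSubtract(n,k):
--  check = 1
--  checkinloop = 1
--  while check <= k:
--    if n%10 != 0 and checkinloop == 1:
--          n = n-1
--          checkinloop = 0
--    if n%10 == 0 and checkinloop == 1:
--          n = int(n/10)
--          checkinloop = 0
--    if check >= k:
--          break
--    check = check+1
--    checkinloop = 1
-- 	### Enter Your Code Here ###
--  return n
-- ===== SOURCE B (Python) =====
-- def weirdSubtract(n, k):
--     # Batch consecutive unit-subtractions: remove the whole last digit at once,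
--     # then do one division; stop early once n hits the fixpoint 0.
--     while k > 0 and n != 0:
--         d = n % 10
--         if d == 0:
--             n //= 10
--             k -= 1
--         else:
--             t = min(k, d)
--             n -= t
--             k -= t
--     return n
-- ===== Notes on version B (the rewrite author's own statement) =====
-- stated objective: faster
-- what changed: Instead of looping k times doing one subtract-or-divide per step, B batches all consecutive unit-subtractions of a digit into one 'n -= min(k, n % 10)' and stops early at the fixpoint 0, so the loop runs once or twice per decimal digit rather than once per step.
import Mathlib
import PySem

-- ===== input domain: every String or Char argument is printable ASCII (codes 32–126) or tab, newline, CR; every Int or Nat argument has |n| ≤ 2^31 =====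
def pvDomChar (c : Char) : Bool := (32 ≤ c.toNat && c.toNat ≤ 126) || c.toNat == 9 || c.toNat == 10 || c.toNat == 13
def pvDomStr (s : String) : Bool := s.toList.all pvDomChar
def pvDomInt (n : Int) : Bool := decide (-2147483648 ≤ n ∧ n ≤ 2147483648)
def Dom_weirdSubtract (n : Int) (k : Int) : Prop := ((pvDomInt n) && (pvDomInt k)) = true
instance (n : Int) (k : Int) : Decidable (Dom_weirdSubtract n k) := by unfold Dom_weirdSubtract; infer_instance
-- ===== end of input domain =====

-- B batches consecutive unit-subtractions (whole last digit at once) and stops at the fixpoint 0: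
-- same return value, fewer loop iterations.

-- ===== PORT A =====
-- Literal port of A's while-loop: `check` counter, `checkinloop` flag, two ifs in order,
-- break when check >= k. `n % 10` is Python's floor-mod = Int.emod (divisor 10 > 0);
-- `int(n/10)` truncates toward zero = Int.tdiv (exact on the domain's magnitudes).
-- fuel = k.toNat bounds the k iterations of the while-loop.
def weirdSubtractLoop (fuel : Nat) (n : Int) (k : Int) (check : Int) : Int :=
  match fuel with
  | 0 => n
  | f + 1 =>
    if check ≤ k then
      let p := if n % 10 ≠ 0 then (n - 1, (0 : Int)) else (n, 1)
      let p2 := if p.1 % 10 = 0 ∧ p.2 = 1 then (p.1.tdiv 10, (0 : Int)) else p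
      if check ≥ k then p2.1
      else weirdSubtractLoop f p2.1 k (check + 1)
    else n

def weirdSubtract (n : Int) (k : Int) : Int :=
  weirdSubtractLoop k.toNat n k 1

-- ===== PORT B =====
-- Port of Source B: while k > 0 and n != 0, remove the last digit in one batch
-- (subtract min(k, n % 10)) or divide once; `n //= 10` is Python floor-div = Int.fdiv.
-- k decreases by at least 1 per iteration, so fuel = k.toNat suffices.
def weirdSubtractAltLoop (fuel : Nat) (n : Int) (k : Int) : Int :=
  match fuel with
  | 0 => n
  | f + 1 =>
    if k > 0 ∧ n ≠ 0 then
      let d := n % 10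
      if d = 0 then weirdSubtractAltLoop f (n.fdiv 10) (k - 1)
      else weirdSubtractAltLoop f (n - min k d) (k - min k d)
    else n

def weirdSubtract_alt (n : Int) (k : Int) : Int :=
  weirdSubtractAltLoop k.toNat n k

-- ===== PRECONDITION & SPEC =====
def Spec_weirdSubtract (n : Int) (k : Int) (out : Int) : Prop := out = weirdSubtract_alt n k
instance (n : Int) (k : Int) (out : Int) : Decidable (Spec_weirdSubtract n k out) := by unfold Spec_weirdSubtract; infer_instance

-- ===== CLAIM (what is proved, stated in full; the proofs are below) =====
def Claim_equal_weirdSubtract : Prop := ∀ (n : Int) (k : Int), Dom_weirdSubtract n k → Spec_weirdSubtract n k (weirdSubtract n k)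

-- ===== LEMMAS AND PROOFS =====

-- The effect of one iteration of A's loop body.
def pvStep (n : Int) : Int := if n % 10 ≠ 0 then n - 1 else n.tdiv 10

theorem pvStep_zero : pvStep 0 = 0 := by decide

theorem pvStep_iter_zero (m : Nat) : pvStep^[m] 0 = 0 :=
  Function.iterate_fixed pvStep_zero m

-- A's loop computes iterated pvStep.
theorem weirdSubtractLoop_eq (f : Nat) : ∀ (n k check : Int), check ≤ k → k - check < (f : Int) →
    weirdSubtractLoop f n k check = pvStep^[(k - check + 1).toNat] n := by
  induction f with
  | zero => intro n k check h1 h2; omega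
  | succ f ih =>
    intro n k check h1 h2
    have hstep : (if (if n % 10 ≠ 0 then (n - 1, (0 : Int)) else (n, 1)).1 % 10 = 0 ∧
        (if n % 10 ≠ 0 then (n - 1, (0 : Int)) else (n, 1)).2 = 1 then
        ((if n % 10 ≠ 0 then (n - 1, (0 : Int)) else (n, 1)).1.tdiv 10, (0 : Int))
        else (if n % 10 ≠ 0 then (n - 1, (0 : Int)) else (n, 1))).1 = pvStep n := by
      by_cases h : n % 10 = 0 <;> simp [h, pvStep]
    by_cases hbr : check ≥ k
    · have hck : check = k := le_antisymm h1 hbr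
      simp only [weirdSubtractLoop, if_pos h1, if_pos hbr, hstep]
      rw [hck]
      have : (k - k + 1).toNat = 1 := by omega
      rw [this, Function.iterate_one]
    · simp only [weirdSubtractLoop, if_pos h1, if_neg hbr, hstep]
      rw [ih (pvStep n) k (check + 1) (by omega) (by omega)]
      have hts : (k - check + 1).toNat = (k - (check + 1) + 1).toNat + 1 := by omega
      rw [hts, Function.iterate_succ_apply]

theorem weirdSubtract_eq_iter (n k : Int) : weirdSubtract n k = pvStep^[k.toNat] n := by
  by_cases hk : 1 ≤ k
  · have := weirdSubtractLoop_eq k.toNat n k 1 hk (by omega)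
    rw [weirdSubtract, this]
    congr 1
    omega
  · have h0 : k.toNat = 0 := by omega
    rw [weirdSubtract, h0]
    rfl

-- Subtracting 1 repeatedly, m ≤ n % 10 times, never crosses a multiple of 10.
theorem pvStep_iter_sub (m : Nat) : ∀ (n : Int), (m : Int) ≤ n % 10 → pvStep^[m] n = n - m := by
  induction m with
  | zero => intro n _; simp
  | succ m ih =>
    intro n h
    have hne : n % 10 ≠ 0 := by omega
    have h1 : pvStep n = n - 1 := by simp [pvStep, hne]
    have h2 : (n - 1) % 10 = n % 10 - 1 := by omega
    rw [Function.iterate_succ_apply, h1, ih (n - 1) (by omega)]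
    push_cast
    ring

-- B's loop computes the same iterated pvStep.
theorem weirdSubtractAltLoop_eq (f : Nat) : ∀ (n k : Int), k.toNat ≤ f →
    weirdSubtractAltLoop f n k = pvStep^[k.toNat] n := by
  induction f with
  | zero =>
    intro n k h
    have h0 : k.toNat = 0 := by omega
    rw [h0]; rfl
  | succ f ih =>
    intro n k h
    by_cases hc : k > 0 ∧ n ≠ 0
    · by_cases hd : n % 10 = 0
      · have hdvd : (10 : Int) ∣ n := Int.dvd_of_emod_eq_zero hd
        have hfd : n.fdiv 10 = pvStep n := by
          simp only [pvStep, hd]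
          rw [Int.fdiv_eq_ediv_of_dvd hdvd, Int.tdiv_eq_ediv_of_dvd hdvd]
          simp
        simp only [weirdSubtractAltLoop, if_pos hc, if_pos hd]
        rw [ih (n.fdiv 10) (k - 1) (by omega), hfd]
        have : k.toNat = (k - 1).toNat + 1 := by omega
        rw [this, Function.iterate_succ_apply]
      · set t := min k (n % 10) with ht
        have hmod : 0 ≤ n % 10 := Int.emod_nonneg n (by norm_num)
        have ht1 : 1 ≤ t := by omega
        have htk : t ≤ k := min_le_left _ _
        simp only [weirdSubtractAltLoop, if_pos hc, if_neg hd]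
        rw [ih (n - t) (k - t) (by omega)]
        have hsplit : k.toNat = (k - t).toNat + t.toNat := by omega
        rw [hsplit, Function.iterate_add_apply]
        congr 1
        rw [pvStep_iter_sub t.toNat n (by omega)]
        congr 1
        omega
    · simp only [weirdSubtractAltLoop, if_neg hc]
      rcases not_and_or.mp hc with hk | hn
      · have h0 : k.toNat = 0 := by omega
        rw [h0]; rfl
      · have hn0 : n = 0 := by simpa using hn
        rw [hn0, pvStep_iter_zero]

-- ===== VERDICT (by name: the statement is the Claim_ definition above) =====
theorem weirdSubtract_spec : Claim_equal_weirdSubtract := by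
  intro n k _
  unfold Spec_weirdSubtract weirdSubtract_alt
  rw [weirdSubtract_eq_iter, weirdSubtractAltLoop_eq k.toNat n k (le_refl _)]
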